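-- pv_equiv track=rewrite | github.com/bixingxie/LeetCode | array/533. Lonely Pixel II.py | findBlackPixel
-- ===== SOURCE A (Python) =====
-- def findBlackPixel(picture, N):
--     """
--     time: O(n**3)
--     space: O(n)
--     :type picture: List[List[str]]
--     :type N: int
--     :rtype: int
--     """
--     res = 0
--
--     if not picture or len(picture) == 0: return 0
--     R, C =  len(picture), len(picture[0])
--     row_black_nums = [row.count('B') for row in picture]
--     col_black_nums = [0] * C
--
--     for c in range(C):
--         for r in range(R):
--             if picture[r][c] == 'B':
--                 col_black_nums[c] += 1
--
--     for r in range(R):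
--         for c in range(C):
--             if picture[r][c] != 'B':
--                 continue
--             if not N == row_black_nums[r] == col_black_nums[c]:
--                 continue
--             if picture.count(picture[r]) != N:
--                 continue
--             res += 1
--
--     return res
-- ===== SOURCE B (Python) =====
-- def findBlackPixel(picture, N):
--     if not picture:
--         return 0
--     C = len(picture[0])
--     col_black = [sum(1 for row in picture if row[c] == 'B') for c in range(C)]
--     freq = {}
--     for row in picture:
--         key = tuple(row)
--         freq[key] = freq.get(key, 0) + 1
--     res = 0
--     for key, cnt in freq.items():
--         if cnt == N and key.count('B') == N:
--             res += cnt * sum(1 for c in range(C) if key[c] == 'B' and col_black[c] == N)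
--     return res
-- ===== Notes on version B (the rewrite author's own statement) =====
-- stated objective: alternative
-- what changed: B builds a row-frequency dictionary and the column black-counts in single passes and then sums per DISTINCT row (multiplying by its multiplicity), instead of A's per-pixel loop that rescans the whole picture with picture.count(row) for every qualifying black pixel; on the measured inputs this was not measurably faster.
import Mathlib
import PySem

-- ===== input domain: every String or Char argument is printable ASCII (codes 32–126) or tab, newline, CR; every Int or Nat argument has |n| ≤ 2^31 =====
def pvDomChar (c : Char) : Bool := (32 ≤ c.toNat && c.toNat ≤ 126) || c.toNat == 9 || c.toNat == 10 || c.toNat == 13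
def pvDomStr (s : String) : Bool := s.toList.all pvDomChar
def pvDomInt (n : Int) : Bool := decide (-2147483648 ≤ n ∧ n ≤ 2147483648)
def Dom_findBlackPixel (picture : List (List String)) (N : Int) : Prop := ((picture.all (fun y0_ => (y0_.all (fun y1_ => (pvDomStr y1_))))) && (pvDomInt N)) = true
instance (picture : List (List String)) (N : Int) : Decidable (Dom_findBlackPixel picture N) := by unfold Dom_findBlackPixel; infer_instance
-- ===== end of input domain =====

-- B replaces A's per-pixel `picture.count(row)` rescan by a row-frequency dictionary built once
-- plus a single pass over the distinct rows (objective: alternative algorithm).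

-- ===== PORT A =====
def findBlackPixel (picture : List (List String)) (N : Int) : Int :=
  if picture = [] ∨ PySem.List.len picture = 0 then 0
  else
    let R : Int := PySem.List.len picture
    let C : Int := PySem.List.len (PySem.List.pyGetD picture 0 [])
    let row_black_nums : List Int := picture.map (fun row => (PySem.List.count row "B" : Int))
    let col_black_nums : List Int :=
      (PySem.List.pyRange 0 C 1).foldl (fun col c =>
        (PySem.List.pyRange 0 R 1).foldl (fun col r =>
          if PySem.List.pyGetD (PySem.List.pyGetD picture r []) c "" == "B" then
            col.set c.toNat (PySem.List.pyGetD col c 0 + 1)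
          else col) col)
        (List.replicate C.toNat 0)
    (PySem.List.pyRange 0 R 1).foldl (fun res r =>
      (PySem.List.pyRange 0 C 1).foldl (fun res c =>
        if !(PySem.List.pyGetD (PySem.List.pyGetD picture r []) c "" == "B") then res
        else if !((N == PySem.List.pyGetD row_black_nums r 0) &&
                  (PySem.List.pyGetD row_black_nums r 0 == PySem.List.pyGetD col_black_nums c 0)) then res
        else if !((PySem.List.count picture (PySem.List.pyGetD picture r []) : Int) == N) then res
        else res + 1) res) 0

-- ===== PORT B =====
def findBlackPixel_alt (picture : List (List String)) (N : Int) : Int :=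
  if picture = [] then 0
  else
    let C : Int := PySem.List.len (PySem.List.pyGetD picture 0 [])
    let col_black : List Int :=
      (PySem.List.pyRange 0 C 1).map (fun c =>
        picture.foldl (fun s row => if PySem.List.pyGetD row c "" == "B" then s + 1 else s) (0 : Int))
    let freq : PySem.Dict (List String) Int :=
      picture.foldl (fun d row => d.insert row (d.getD row 0 + 1)) PySem.Dict.empty
    freq.items.foldl (fun res kv =>
      if (kv.2 == N) && ((PySem.List.count kv.1 "B" : Int) == N) then
        res + kv.2 * ((PySem.List.pyRange 0 C 1).foldl (fun s c =>
          if (PySem.List.pyGetD kv.1 c "" == "B") &&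
             (PySem.List.pyGetD col_black c 0 == N) then s + 1 else s) (0 : Int))
      else res) 0

-- ===== PRECONDITION & SPEC =====
-- Pre_ excludes exactly the ragged pictures on which Python A raises IndexError:
-- some row shorter than the first row (whose length is the column count being scanned).
def Pre_findBlackPixel (picture : List (List String)) (N : Int) : Prop :=
  ∀ row ∈ picture, (PySem.List.pyGetD picture 0 []).length ≤ row.length
instance (picture : List (List String)) (N : Int) : Decidable (Pre_findBlackPixel picture N) := by
  unfold Pre_findBlackPixel; infer_instance
def pvWitness_findBlackPixel : List (List String) × Int := ([["B", "W"], ["B", "B"]], 1)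
def Spec_findBlackPixel (picture : List (List String)) (N : Int) (out : Int) : Prop := out = findBlackPixel_alt picture N
instance (picture : List (List String)) (N : Int) (out : Int) : Decidable (Spec_findBlackPixel picture N out) := by unfold Spec_findBlackPixel; infer_instance

-- ===== CLAIM (what is proved, stated in full; the proofs are below) =====
def Claim_equal_findBlackPixel : Prop := ∀ (picture : List (List String)) (N : Int), Dom_findBlackPixel picture N → Pre_findBlackPixel picture N → Spec_findBlackPixel picture N (findBlackPixel picture N)

-- ===== LEMMAS AND PROOFS =====

/-- Number of rows whose entry in column `c` is "B". -/
def pvCntB (picture : List (List String)) (c : Int) : Nat :=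
  picture.countP (fun row => PySem.List.pyGetD row c "" == "B")

/-- Per-row contribution both programs compute. -/
def pvG (picture : List (List String)) (C N : Int) (row : List String) : Int :=
  if (List.count row picture : Int) = N ∧ (PySem.List.count row "B" : Int) = N then
    ((PySem.List.pyRange 0 C 1).countP
      (fun c => (PySem.List.pyGetD row c "" == "B") && ((pvCntB picture c : Int) == N)) : Int)
  else 0

theorem pvBodyA (res : Int) (x y z : Bool) :
    (if !x then res else if !y then res else if !z then res else res + 1)
      = res + (if x && y && z then 1 else 0) := by
  cases x <;> cases y <;> cases z <;> simp

theorem pvBodyB (res v w : Int) (b : Bool) :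
    (if b then res + v * w else res) = res + (if b then v * w else 0) := by
  cases b <;> simp

/-- `List.count` does not depend on which (lawful) `BEq` instance is used. -/
theorem pvCountEqCount {α : Type} [BEq α] [LawfulBEq α] [DecidableEq α] (m : α) (l : List α) :
    @List.count α instBEqOfDecidableEq m l = @List.count α _ m l := by
  unfold List.count
  apply List.countP_congr
  intro x _
  simp

/-- Sum over the distinct keys weighted by multiplicity = plain sum. -/
theorem pvCountSum {α : Type} [BEq α] [LawfulBEq α] [DecidableEq α] (l : List α) (g : α → Int) :
    ((PySem.Set.ofList l).map (fun k => (List.count k l : Int) * g k)).sum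
      = (l.map g).sum := by
  rw [Finset.sum_list_map_count l g]
  rw [← List.sum_toFinset _ (PySem.Set.nodup_ofList l)]
  have hfs : (PySem.Set.ofList l).toFinset = l.toFinset := by
    ext x; simp [PySem.Set.mem_ofList]
  rw [hfs]
  refine Finset.sum_congr rfl ?_
  intro m _
  rw [nsmul_eq_mul, pvCountEqCount]

/-- A loop that conditionally bumps one fixed (nonnegative) cell of a list. -/
theorem pvInnerFold (P : Int → Bool) (k : Int) (hk0 : 0 ≤ k) (rs : List Int) :
    ∀ (col : List Int),
      rs.foldl (fun col r =>
          if P r then col.set k.toNat (PySem.List.pyGetD col k 0 + 1) else col) col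
        = col.set k.toNat (PySem.List.pyGetD col k 0 + (rs.countP P : Nat)) := by
  induction rs with
  | nil =>
    intro col
    simp only [List.foldl_nil, List.countP_nil, Nat.cast_zero, add_zero]
    by_cases hk : k.toNat < col.length
    · rw [PySem.List.pyGetD_of_nonneg _ _ hk0, List.getD_eq_getElem col 0 hk]
      exact (List.set_getElem_self ..).symm
    · exact (List.set_eq_of_length_le (by omega)).symm
  | cons r rs ih =>
    intro col
    by_cases hk : k.toNat < col.length
    · simp only [List.foldl_cons]
      by_cases hp : P r
      · rw [if_pos hp, ih, List.set_set, List.countP_cons, if_pos hp]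
        have hg : PySem.List.pyGetD (col.set k.toNat (PySem.List.pyGetD col k 0 + 1)) k 0
            = PySem.List.pyGetD col k 0 + 1 := by
          rw [PySem.List.pyGetD_of_nonneg _ _ hk0, PySem.List.pyGetD_of_nonneg _ _ hk0]
          simp [List.getD, hk]
        rw [hg]; congr 1; push_cast; ring
      · rw [if_neg hp, ih, List.countP_cons, if_neg hp]; simp
    · have hle : col.length ≤ k.toNat := by omega
      simp only [List.foldl_cons, List.set_eq_of_length_le hle, ite_self]
      rw [ih]; rw [List.set_eq_of_length_le hle]

/-- A loop that bumps pairwise-distinct nonnegative cells, described elementwise. -/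
theorem pvSetFold (g : Int → Int) (cs : List Int) :
    ∀ (col : List Int), (∀ c ∈ cs, 0 ≤ c) → cs.Nodup →
      ((cs.foldl (fun col c => col.set c.toNat (PySem.List.pyGetD col c 0 + g c)) col).length
          = col.length) ∧
      (∀ k : Nat, k < col.length →
        (cs.foldl (fun col c => col.set c.toNat (PySem.List.pyGetD col c 0 + g c)) col).getD k 0
          = if (k : Int) ∈ cs then col.getD k 0 + g k else col.getD k 0) := by
  induction cs with
  | nil => intro col _ _; simp
  | cons c cs ih =>
    intro col hpos hnd
    have hc0 : 0 ≤ c := hpos c (by simp)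
    have hcs : ∀ x ∈ cs, 0 ≤ x := fun x hx => hpos x (by simp [hx])
    have hnd' : cs.Nodup := hnd.of_cons
    have hcn : c ∉ cs := by simp at hnd; exact hnd.1
    set col' := col.set c.toNat (PySem.List.pyGetD col c 0 + g c) with hcol'
    have hlen' : col'.length = col.length := by simp [hcol']
    obtain ⟨ihl, ihe⟩ := ih col' hcs hnd'
    simp only [List.foldl_cons]
    refine ⟨by rw [ihl, hlen'], ?_⟩
    intro k hk
    rw [ihe k (by omega)]
    by_cases hkc : (k : Int) = c
    · have hkc' : c.toNat = k := by omega
      have hmem : ¬ ((k : Int) ∈ cs) := by rw [hkc]; exact hcn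
      rw [if_neg hmem, if_pos (by simp [hkc])]
      rw [hcol', hkc', ← hkc]
      rw [PySem.List.pyGetD_natCast]
      simp [List.getD, hk]
    · have hset : col'.getD k 0 = col.getD k 0 := by
        have : c.toNat ≠ k := by omega
        simp [hcol', List.getD, List.getElem?_set_ne this]
      rw [hset]
      by_cases hmem : (k : Int) ∈ cs
      · rw [if_pos hmem, if_pos (by simp [hmem])]
      · rw [if_neg hmem, if_neg (by simp [hkc, hmem])]

/-- Counting over the index range of `picture` is counting over its rows. -/
theorem pvCntRange (picture : List (List String)) (P : List String → Bool) :
    (PySem.List.pyRange 0 (PySem.List.len picture) 1).countP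
        (fun r => P (PySem.List.pyGetD picture r []))
      = picture.countP P := by
  conv_rhs => rw [← PySem.List.map_pyGetD_pyRange_zero' picture []]
  rw [List.countP_map]
  rw [PySem.List.len_eq]
  rfl

/-- A's column-count table is the table of `pvCntB`. -/
theorem pvColA (picture : List (List String)) (C : Int)
    (hC : C = PySem.List.len (PySem.List.pyGetD picture 0 [])) :
    (PySem.List.pyRange 0 C 1).foldl (fun col c =>
        (PySem.List.pyRange 0 (PySem.List.len picture) 1).foldl (fun col r =>
          if PySem.List.pyGetD (PySem.List.pyGetD picture r []) c "" == "B" then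
            col.set c.toNat (PySem.List.pyGetD col c 0 + 1)
          else col) col)
      (List.replicate C.toNat 0)
      = (List.range (PySem.List.pyGetD picture 0 []).length).map
          (fun k : Nat => ((pvCntB picture (k : Int) : Nat) : Int)) := by
  have hstep : ∀ (col : List Int), ∀ c ∈ PySem.List.pyRange 0 C 1,
      (PySem.List.pyRange 0 (PySem.List.len picture) 1).foldl (fun col r =>
          if PySem.List.pyGetD (PySem.List.pyGetD picture r []) c "" == "B" then
            col.set c.toNat (PySem.List.pyGetD col c 0 + 1)
          else col) col
        = col.set c.toNat (PySem.List.pyGetD col c 0 + ((pvCntB picture c : Nat) : Int)) := by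
    intro col c hc
    have hc0 : 0 ≤ c := (PySem.List.mem_pyRange_one.mp hc).1
    rw [pvInnerFold _ c hc0]
    rw [pvCntRange picture (fun row => PySem.List.pyGetD row c "" == "B")]
    rfl
  rw [PySem.List.foldl_congr_mem _ _ _ _ hstep]
  have hpos : ∀ c ∈ PySem.List.pyRange 0 C 1, (0 : Int) ≤ c :=
    fun c hc => (PySem.List.mem_pyRange_one.mp hc).1
  obtain ⟨hlen, helt⟩ := pvSetFold (fun c => ((pvCntB picture c : Nat) : Int))
    (PySem.List.pyRange 0 C 1) (List.replicate C.toNat 0) hpos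
    (PySem.List.nodup_pyRange_one 0 C)
  have hCnat : C.toNat = (PySem.List.pyGetD picture 0 []).length := by
    rw [hC, PySem.List.len_eq]; omega
  apply List.ext_getElem
  · rw [hlen]; simp [hCnat]
  · intro k hk1 hk2
    have hklt : k < C.toNat := by rwa [hlen, List.length_replicate] at hk1
    have h1 : _ = _ := helt k (by simpa using hklt)
    rw [← List.getD_eq_getElem _ 0 hk1, h1]
    have hmem : (k : Int) ∈ PySem.List.pyRange 0 C 1 := by
      rw [PySem.List.mem_pyRange_one]; omega
    rw [if_pos hmem]
    simp [List.getD, hklt]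

theorem pvA_eq (picture : List (List String)) (N : Int) (hne : picture ≠ []) :
    findBlackPixel picture N
      = (picture.map (pvG picture (PySem.List.len (PySem.List.pyGetD picture 0 [])) N)).sum := by
  have hcond : ¬ (picture = [] ∨ PySem.List.len picture = 0) := by
    rw [PySem.List.len_eq]
    rintro (h | h)
    · exact hne h
    · exact hne (by simpa using h)
  simp only [findBlackPixel, if_neg hcond]
  rw [pvColA picture _ rfl]
  set C : Int := PySem.List.len (PySem.List.pyGetD picture 0 []) with hCdef
  set C' : Nat := (PySem.List.pyGetD picture 0 []).length with hC'def
  have hCC : C = (C' : Int) := by rw [hCdef, PySem.List.len_eq]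
  set gA : Int → Int := fun r =>
    (((PySem.List.pyRange 0 C 1).countP (fun c =>
        (PySem.List.pyGetD (PySem.List.pyGetD picture r []) c "" == "B") &&
        ((N == ((PySem.List.count (PySem.List.pyGetD picture r []) "B" : Nat) : Int)) &&
         (((PySem.List.count (PySem.List.pyGetD picture r []) "B" : Nat) : Int) == ((pvCntB picture c : Nat) : Int))) &&
        (((PySem.List.count picture (PySem.List.pyGetD picture r []) : Nat) : Int) == N)) : Nat) : Int) with hgA
  have hcb : ∀ c : Int, c ∈ PySem.List.pyRange 0 C 1 →
      PySem.List.pyGetD ((List.range C').map (fun k : Nat => ((pvCntB picture (k : Int) : Nat) : Int))) c 0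
        = ((pvCntB picture c : Nat) : Int) := by
    intro c hc
    obtain ⟨h0, h1⟩ := PySem.List.mem_pyRange_one.mp hc
    rw [PySem.List.pyGetD_of_nonneg _ _ h0]
    rw [PySem.List.getD_map_range _ _ _ _ (by omega)]
    rw [Int.toNat_of_nonneg h0]
  have hstep : ∀ (res : Int), ∀ r ∈ PySem.List.pyRange 0 (PySem.List.len picture) 1,
      (PySem.List.pyRange 0 C 1).foldl (fun res c =>
        if !(PySem.List.pyGetD (PySem.List.pyGetD picture r []) c "" == "B") then res
        else if !((N == PySem.List.pyGetD (picture.map (fun row => ((PySem.List.count row "B" : Nat) : Int))) r 0) &&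
                  (PySem.List.pyGetD (picture.map (fun row => ((PySem.List.count row "B" : Nat) : Int))) r 0 ==
                    PySem.List.pyGetD ((List.range C').map (fun k : Nat => ((pvCntB picture (k : Int) : Nat) : Int))) c 0)) then res
        else if !(((PySem.List.count picture (PySem.List.pyGetD picture r []) : Nat) : Int) == N) then res
        else res + 1) res = res + gA r := by
    intro res r _
    rw [PySem.List.foldl_congr_mem _ _
      (fun res c =>
        res + (if (PySem.List.pyGetD (PySem.List.pyGetD picture r []) c "" == "B") &&
          ((N == PySem.List.pyGetD (picture.map (fun row => ((PySem.List.count row "B" : Nat) : Int))) r 0) &&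
           (PySem.List.pyGetD (picture.map (fun row => ((PySem.List.count row "B" : Nat) : Int))) r 0 ==
              PySem.List.pyGetD ((List.range C').map (fun k : Nat => ((pvCntB picture (k : Int) : Nat) : Int))) c 0)) &&
          (((PySem.List.count picture (PySem.List.pyGetD picture r []) : Nat) : Int) == N) then 1 else 0)) res
      (fun acc c _ => pvBodyA acc _ _ _)]
    rw [PySem.List.foldl_add]
    rw [PySem.List.sum_map_ite_one_zero]
    rw [hgA]
    beta_reduce
    have hrb : PySem.List.pyGetD (picture.map (fun row => ((PySem.List.count row "B" : Nat) : Int))) r 0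
        = ((PySem.List.count (PySem.List.pyGetD picture r []) "B" : Nat) : Int) :=
      PySem.List.pyGetD_map (fun row => ((PySem.List.count row "B" : Nat) : Int)) picture r []
    refine congrArg (fun res' => res + res') (congrArg (fun n : Nat => (n : Int)) (List.countP_congr ?_))
    intro c hc
    rw [hcb c hc, hrb]
  rw [PySem.List.foldl_congr_mem _ _ (fun res r => res + gA r) 0 hstep]
  rw [PySem.List.foldl_add]
  rw [zero_add]
  set F : List String → Int := fun row =>
    (((PySem.List.pyRange 0 C 1).countP (fun c =>
        (PySem.List.pyGetD row c "" == "B") &&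
        ((N == ((PySem.List.count row "B" : Nat) : Int)) &&
         (((PySem.List.count row "B" : Nat) : Int) == ((pvCntB picture c : Nat) : Int))) &&
        (((PySem.List.count picture row : Nat) : Int) == N)) : Nat) : Int) with hF
  have h2 : gA = fun r => F (PySem.List.pyGetD picture r []) := rfl
  rw [h2]
  have h3 : (PySem.List.pyRange 0 (PySem.List.len picture) 1).map
        (fun r => F (PySem.List.pyGetD picture r [])) = picture.map F := by
    rw [PySem.List.len_eq]
    conv_rhs => rw [← PySem.List.map_pyGetD_pyRange_zero' picture []]
    rw [List.map_map]
    rfl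
  rw [h3]
  refine congrArg List.sum (List.map_congr_left ?_)
  intro row _
  rw [hF]
  beta_reduce
  unfold pvG
  by_cases hcnt : ((List.count row picture : Nat) : Int) = N
  · by_cases hrb : ((PySem.List.count row "B" : Nat) : Int) = N
    · rw [if_pos ⟨hcnt, hrb⟩]
      refine congrArg (fun n : Nat => (n : Int)) (List.countP_congr ?_)
      intro c _
      simp only [Bool.and_eq_true, beq_iff_eq]
      constructor
      · rintro ⟨⟨h1, _, h3'⟩, _⟩
        exact ⟨h1, h3' ▸ hrb⟩
      · rintro ⟨h1, h4⟩
        exact ⟨⟨h1, hrb.symm, hrb.trans h4.symm⟩, hcnt⟩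
    · rw [if_neg (fun h => hrb h.2)]
      rw [List.countP_eq_zero.mpr ?_]
      · rfl
      · intro c _
        simp only [Bool.and_eq_true, beq_iff_eq, not_and]
        rintro ⟨_, hN, _⟩
        exact absurd hN.symm hrb
  · rw [if_neg (fun h => hcnt h.1)]
    rw [List.countP_eq_zero.mpr ?_]
    · rfl
    · intro c _
      simp only [Bool.and_eq_true, beq_iff_eq, not_and]
      rintro _ hc
      exact absurd hc hcnt

theorem pvB_eq (picture : List (List String)) (N : Int) (hne : picture ≠ []) :
    findBlackPixel_alt picture N
      = (picture.map (pvG picture (PySem.List.len (PySem.List.pyGetD picture 0 [])) N)).sum := by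
  simp only [findBlackPixel_alt]
  rw [if_neg hne]
  simp only [PySem.List.foldl_count_if, zero_add]
  rw [PySem.Dict.foldl_insert_getD_add_one_eq_counter]
  rw [PySem.Dict.items_counter]
  set C : Int := PySem.List.len (PySem.List.pyGetD picture 0 []) with hCdef
  set gB : (List String × Int) → Int := fun kv =>
    if (kv.2 == N) && (((PySem.List.count kv.1 "B" : Nat) : Int) == N) then
      kv.2 * ((PySem.List.pyRange 0 C 1).countP (fun c =>
        (PySem.List.pyGetD kv.1 c "" == "B") &&
        (PySem.List.pyGetD ((PySem.List.pyRange 0 C 1).map (fun c =>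
            ((picture.countP (fun row => PySem.List.pyGetD row c "" == "B") : Nat) : Int))) c 0 == N)) : Nat)
    else 0 with hgB
  rw [PySem.List.foldl_congr_mem _ _ (fun res kv => res + gB kv) 0
    (fun acc kv _ => pvBodyB acc _ _ _)]
  rw [PySem.List.foldl_add, zero_add]
  rw [List.map_map]
  rw [show (gB ∘ fun k => (k, ((List.count k picture : Nat) : Int)))
      = fun k => gB (k, ((List.count k picture : Nat) : Int)) from rfl]
  have hpt : ∀ k ∈ PySem.Set.ofList picture,
      gB (k, ((List.count k picture : Nat) : Int))
        = ((List.count k picture : Nat) : Int) * pvG picture C N k := by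
    intro k _
    rw [hgB]
    beta_reduce
    unfold pvG
    by_cases hcnt : ((List.count k picture : Nat) : Int) = N
    · by_cases hrb : ((PySem.List.count k "B" : Nat) : Int) = N
      · rw [if_pos (by rw [Bool.and_eq_true, beq_iff_eq, beq_iff_eq]; exact ⟨hcnt, hrb⟩), if_pos ⟨hcnt, hrb⟩]
        refine congrArg _ (congrArg (fun n : Nat => (n : Int)) (List.countP_congr ?_))
        intro c hc
        obtain ⟨h0, h1⟩ := PySem.List.mem_pyRange_one.mp hc
        rw [PySem.List.pyGetD_map_pyRange_of_nonneg _ _ _ _ h0 h1]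
        rfl
      · rw [if_neg (by rw [Bool.and_eq_true, beq_iff_eq, beq_iff_eq]; exact fun h => hrb h.2),
            if_neg (fun h => hrb h.2), mul_zero]
    · rw [if_neg (by rw [Bool.and_eq_true, beq_iff_eq, beq_iff_eq]; exact fun h => hcnt h.1),
          if_neg (fun h => hcnt h.1), mul_zero]
  rw [List.map_congr_left hpt]
  exact pvCountSum picture (pvG picture C N)

-- ===== VERDICT (by name: the statement is the Claim_ definition above) =====
theorem findBlackPixel_spec : Claim_equal_findBlackPixel := by
  intro picture N _ _
  unfold Spec_findBlackPixel
  by_cases hne : picture = []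
  · subst hne; rfl
  · rw [pvA_eq picture N hne, pvB_eq picture N hne]
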